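-- pv_equiv track=rewrite | github.com/ssamko0911/PyWars | tasks/task018.py | capitals_first
-- ===== SOURCE A (Python) =====
-- def capitals_first(text):
--     caps = []
--     lowers = []
--
--     for word in text.split():
--         if word[0].isupper():
--             caps.append(word)
--         elif word[0].islower():
--             lowers.append(word)
--         else:
--             pass
--
--     return ' '.join(caps + lowers)
-- ===== SOURCE B (Python) =====
-- def capitals_first(text):
--     words = [w for w in text.split() if w[0].isupper() or w[0].islower()]
--     return ' '.join(sorted(words, key=lambda w: 0 if w[0].isupper() else 1))
-- ===== Notes on version B (the rewrite author's own statement) =====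
-- stated objective: simpler
-- what changed: Replaces the explicit two-bucket append loop with a filter followed by one stable sort on a binary key (0 for capitalized, 1 for lowercase), relying on sort stability for intra-group order.
import Mathlib
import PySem

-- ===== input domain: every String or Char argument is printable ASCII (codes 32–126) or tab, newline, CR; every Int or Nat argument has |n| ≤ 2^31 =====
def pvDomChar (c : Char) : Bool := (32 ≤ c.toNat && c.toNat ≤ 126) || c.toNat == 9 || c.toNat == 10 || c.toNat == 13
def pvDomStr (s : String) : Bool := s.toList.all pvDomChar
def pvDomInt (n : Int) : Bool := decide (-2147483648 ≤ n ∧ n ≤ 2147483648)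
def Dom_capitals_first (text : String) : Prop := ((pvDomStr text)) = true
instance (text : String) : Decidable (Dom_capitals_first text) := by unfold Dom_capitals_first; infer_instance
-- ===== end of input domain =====

-- B replaces A's two-bucket append loop by a filter plus one stable sort on a binary key (simpler decomposition; same result).


-- ===== PORT A =====
-- the loop body: word[0].isupper() → caps, elif word[0].islower() → lowers, else skip
-- (the [] branch is unreachable: str.split() never yields an empty word, so word[0] never raises)
def capsStep (acc : List String × List String) (word : String) : List String × List String :=
  match word.toList with
  | c :: _ =>
      if PySem.Chars.isupper c then (acc.1 ++ [word], acc.2)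
      else if PySem.Chars.islower c then (acc.1, acc.2 ++ [word])
      else acc
  | [] => acc

def capitals_first (text : String) : String :=
  let r := (PySem.Str.split₀ text).foldl capsStep ([], [])
  PySem.Str.join " " (r.1 ++ r.2)

-- ===== PORT B =====
-- w[0].isupper() or w[0].islower() — only applied to words of split(), which are nonempty
def goodB (w : String) : Bool :=
  match w.toList with
  | c :: _ => PySem.Chars.isupper c || PySem.Chars.islower c
  | [] => false

-- key: 0 if w[0].isupper() else 1 (the [] branch is unreachable after the filter)
def keyB (w : String) : Int :=
  match w.toList with
  | c :: _ => if PySem.Chars.isupper c then 0 else 1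
  | [] => 1

def capitals_first_alt (text : String) : String :=
  PySem.Str.join " " (PySem.List.sorted ((PySem.Str.split₀ text).filter goodB) keyB false)

-- ===== PRECONDITION & SPEC =====
def Spec_capitals_first (text : String) (out : String) : Prop := out = capitals_first_alt text
instance (text : String) (out : String) : Decidable (Spec_capitals_first text out) := by unfold Spec_capitals_first; infer_instance

-- ===== CLAIM (what is proved, stated in full; the proofs are below) =====
def Claim_equal_capitals_first : Prop := ∀ (text : String), Dom_capitals_first text → Spec_capitals_first text (capitals_first text)

-- ===== LEMMAS AND PROOFS =====

-- first char is upper / first char is lower-but-not-upper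
def pU (w : String) : Bool :=
  match w.toList with
  | c :: _ => PySem.Chars.isupper c
  | [] => false

def pL (w : String) : Bool :=
  match w.toList with
  | c :: _ => !PySem.Chars.isupper c && PySem.Chars.islower c
  | [] => false

theorem keyB_cases (w : String) : keyB w = 0 ∨ keyB w = 1 := by
  unfold keyB; rcases w.toList with _ | ⟨c, cs⟩ <;> [simp; skip] <;> split <;> simp

theorem aInv (ws : List String) : ∀ (C L : List String),
    ws.foldl capsStep (C, L) = (C ++ ws.filter pU, L ++ ws.filter pL) := by
  induction ws with
  | nil => intro C L; simp
  | cons x ws ih =>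
    intro C L
    simp only [List.foldl_cons]
    have hstep : capsStep (C, L) x =
        (C ++ (if pU x then [x] else []), L ++ (if pL x then [x] else [])) := by
      unfold capsStep pU pL
      rcases hx : x.toList with _ | ⟨c, cs⟩ <;> simp
      by_cases hu : PySem.Chars.isupper c <;> by_cases hl : PySem.Chars.islower c <;>
        simp [hu, hl]
    rw [hstep, ih]
    by_cases hu : pU x <;> by_cases hl : pL x <;>
      simp [hu, hl]

def befB (a b : String) : Bool := decide (keyB a < keyB b)

theorem insertBy_cons (x y : String) (ys : List String) :
    PySem.List.insertBy befB x (y :: ys) =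
      if befB x y then x :: y :: ys else y :: PySem.List.insertBy befB x ys := rfl

theorem ins_key0 (x : String) (hx : keyB x = 0) :
    ∀ (C L : List String), (∀ c ∈ C, keyB c = 0) → (∀ l ∈ L, keyB l = 1) →
      PySem.List.insertBy befB x (C ++ L) = (C ++ [x]) ++ L := by
  intro C
  induction C with
  | nil =>
    intro L _ hL
    rcases L with _ | ⟨y, ys⟩
    · simp [PySem.List.insertBy]
    · have : befB x y = true := by
        simp [befB, hx, hL y (by simp)]
      simp [insertBy_cons, this]
  | cons a C ih =>
    intro L hC hL
    have ha : keyB a = 0 := hC a (by simp)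
    have : befB x a = false := by simp [befB, hx, ha]
    simp only [List.cons_append, insertBy_cons, this, if_false, Bool.false_eq_true]
    rw [ih L (fun c hc => hC c (by simp [hc])) hL]

theorem ins_key1 (x : String) (hx : keyB x = 1) (ys : List String) :
    PySem.List.insertBy befB x ys = ys ++ [x] := by
  apply PySem.List.insertBy_of_forall_not_before
  intro y _
  rcases keyB_cases y with h | h <;> simp [befB, hx, h]

def k0 (w : String) : Bool := keyB w == 0

theorem sortInv (ws : List String) : ∀ (C L : List String),
    (∀ c ∈ C, keyB c = 0) → (∀ l ∈ L, keyB l = 1) →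
    ws.foldl (fun acc x => PySem.List.insertBy befB x acc) (C ++ L)
      = (C ++ ws.filter k0) ++ (L ++ ws.filter (fun w => !k0 w)) := by
  induction ws with
  | nil => intro C L _ _; simp
  | cons x ws ih =>
    intro C L hC hL
    simp only [List.foldl_cons]
    by_cases hx : k0 x
    · have hx0 : keyB x = 0 := by simpa [k0] using hx
      have hC' : ∀ c ∈ C ++ [x], keyB c = 0 := by
        intro c hc
        rcases List.mem_append.1 hc with h | h
        · exact hC c h
        · simp at h; simpa [h] using hx0
      rw [ins_key0 x hx0 C L hC hL, ih (C ++ [x]) L hC' hL]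
      simp [hx]
    · have hx1 : keyB x = 1 := by
        rcases keyB_cases x with h | h
        · exact absurd (by simp [k0, h]) hx
        · exact h
      have hL' : ∀ l ∈ L ++ [x], keyB l = 1 := by
        intro l hl
        rcases List.mem_append.1 hl with h | h
        · exact hL l h
        · simp at h; simpa [h] using hx1
      have hassoc : C ++ L ++ [x] = C ++ (L ++ [x]) := by simp
      rw [ins_key1 x hx1 (C ++ L), hassoc, ih C (L ++ [x]) hC hL']
      simp [hx]

theorem good_k0_eq_pU (w : String) : (goodB w && k0 w) = pU w := by
  unfold goodB k0 keyB pU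
  rcases w.toList with _ | ⟨c, cs⟩ <;> simp
  by_cases hu : PySem.Chars.isupper c <;> by_cases hl : PySem.Chars.islower c <;>
    simp [hu, hl]

theorem good_not_k0_eq_pL (w : String) : (goodB w && !k0 w) = pL w := by
  unfold goodB k0 keyB pL
  rcases w.toList with _ | ⟨c, cs⟩ <;> simp
  by_cases hu : PySem.Chars.isupper c <;> by_cases hl : PySem.Chars.islower c <;>
    simp [hu, hl]

theorem sorted_filtered (ws : List String) :
    PySem.List.sorted (ws.filter goodB) keyB false = ws.filter pU ++ ws.filter pL := by
  rw [PySem.List.sorted_eq_foldl_insertBy]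
  have h := sortInv (ws.filter goodB) [] [] (by simp) (by simp)
  simp only [List.nil_append, List.append_nil] at h
  have hb : (fun a b => decide (keyB a < keyB b)) = befB := rfl
  rw [hb, h, List.filter_filter, List.filter_filter]
  congr 1
  · exact List.filter_congr (fun w _ => by rw [Bool.and_comm]; exact good_k0_eq_pU w)
  · exact List.filter_congr (fun w _ => by rw [Bool.and_comm]; exact good_not_k0_eq_pL w)

-- ===== VERDICT (by name: the statement is the Claim_ definition above) =====
theorem capitals_first_spec : Claim_equal_capitals_first := by
  intro text _
  unfold Spec_capitals_first capitals_first capitals_first_alt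
  rw [sorted_filtered, aInv]
  simp
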